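-- pv_equiv track=rewrite | github.com/hehehe47/LeetCode | Akuna/Python Dev/1.py | process
-- ===== SOURCE A (Python) =====
-- def process(line: str) -> str:
--     # Return 'VALID' or 'INVALID'
--
--     import string
--     if not all(c in string.hexdigits for c in line):
--         return 'INVALID'
--     temp = int(line[2:], 16)
--
--     s = sum(list(map(int, list(str(temp)))))
--
--     dexTohex = hex(s).split('x')[-1]
--     if dexTohex != line[:2].lower():
--         return 'INVALID'
--     else:
--         return 'VALID'
-- ===== SOURCE B (Python) =====
-- import string
--
-- CHUNK = 10 ** 36
--
-- def process(line: str) -> str: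
--     # Return 'VALID' or 'INVALID'
--     if not (set(line) <= set(string.hexdigits)):
--         return 'INVALID'
--     n = int(line[2:], 16)
--     s = 0
--     while n > 0:
--         n, r = divmod(n, CHUNK)
--         while r > 0:
--             s += r % 10
--             r //= 10
--     return 'VALID' if format(s, 'x') == line[:2].lower() else 'INVALID'
-- ===== Notes on version B (the rewrite author's own statement) =====
-- stated objective: alternative
-- what changed: The digit sum is computed arithmetically with divmod loops (peeling 36-digit chunks, then single digits) instead of round-tripping through sum(map(int, str(temp))), the checksum is formatted directly with format(s, 'x') instead of hex(s).split('x')[-1], and the hex-validity guard is a set-inclusion test set(line) <= set(string.hexdigits) instead of a per-character generator scan.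
import Mathlib
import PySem

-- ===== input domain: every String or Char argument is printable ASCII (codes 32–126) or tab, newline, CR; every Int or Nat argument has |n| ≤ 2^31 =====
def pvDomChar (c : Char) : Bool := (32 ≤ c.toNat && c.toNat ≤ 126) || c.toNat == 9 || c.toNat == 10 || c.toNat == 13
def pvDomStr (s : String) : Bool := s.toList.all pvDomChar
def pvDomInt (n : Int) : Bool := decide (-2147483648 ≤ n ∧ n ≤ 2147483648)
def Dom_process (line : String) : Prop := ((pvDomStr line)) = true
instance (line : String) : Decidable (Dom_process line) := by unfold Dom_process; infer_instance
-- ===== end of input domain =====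

-- B replaces A's string round-trips (sum(map(int, str(temp))) and hex(s).split('x')[-1]) by an
-- arithmetic digit-sum loop and direct hex formatting, and the per-char guard by a set-inclusion test.

-- ===== PORT A =====

-- string.hexdigits
def hexAll : List Char := "0123456789abcdefABCDEF".toList

-- hex(n) as characters ("0x" + hex digits, '-' in front for negatives; same shape as PySem.Int.pyBin); exact
def pyHexChars (n : Int) : List Char :=
  if n < 0 then '-' :: '0' :: 'x' :: Nat.toDigits 16 n.natAbs
  else '0' :: 'x' :: Nat.toDigits 16 n.toNat

def process (line : String) : String :=
  -- if not all(c in string.hexdigits for c in line): return 'INVALID'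
  if line.toList.all (fun c => hexAll.contains c) then
    -- temp = int(line[2:], 16)
    match PySem.Int.ofStrBase? (PySem.Str.slice line (some 2) none) 16 with
    | none => ""      -- int('', 16) raises ValueError: excluded by Pre_process
    | some temp =>
      -- s = sum(list(map(int, list(str(temp)))));  int(c) on a decimal-digit character is exactly c.toNat - 48
      let s : Int := ((PySem.Int.toChars temp).map (fun c => ((c.toNat : Int) - 48))).sum
      -- dexTohex = hex(s).split('x')[-1]
      let dexTohex := PySem.List.pyGetD (PySem.Chars.splitOn (pyHexChars s) ['x']) (-1) []
      -- the str comparison with line[:2].lower() is done on the character lists (String equality is the same)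
      if dexTohex ≠ PySem.Chars.lower (PySem.List.slice line.toList none (some 2)) then "INVALID"
      else "VALID"
  else "INVALID"

-- ===== PORT B =====

-- set(string.hexdigits)
def hexdigitsSet : PySem.Set Char := PySem.Set.ofList "0123456789abcdefABCDEF".toList

-- inner loop: while r > 0: s += r % 10; r //= 10
def digitSumLoop (n : Int) : Int :=
  if h : 0 < n then PySem.Int.mod n 10 + digitSumLoop (PySem.Int.floordiv n 10) else 0
termination_by n.toNat
decreasing_by
  have h10 : PySem.Int.floordiv n 10 = n / 10 := PySem.Int.floordiv_eq_ediv_of_pos (by omega)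
  have h1 : n / 10 < n := by
    rw [Int.ediv_lt_iff_lt_mul (by omega)]
    nlinarith
  have h2 : 0 ≤ n / 10 := Int.ediv_nonneg (le_of_lt h) (by omega)
  rw [h10]; omega

-- outer loop: while n > 0: n, r = divmod(n, CHUNK); <inner loop over r>   (CHUNK = 10**36)
def digitSumChunks (n : Int) : Int :=
  if h : 0 < n then
    digitSumLoop (PySem.Int.mod n (10 ^ 36)) + digitSumChunks (PySem.Int.floordiv n (10 ^ 36))
  else 0
termination_by n.toNat
decreasing_by
  have hK : (0 : Int) < 10 ^ 36 := by positivity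
  have h10 : PySem.Int.floordiv n (10 ^ 36) = n / 10 ^ 36 := PySem.Int.floordiv_eq_ediv_of_pos hK
  have h1 : n / 10 ^ 36 < n := by
    rw [Int.ediv_lt_iff_lt_mul hK]
    nlinarith
  have h2 : 0 ≤ n / 10 ^ 36 := Int.ediv_nonneg (le_of_lt h) (le_of_lt hK)
  rw [h10]; omega

def process_alt (line : String) : String :=
  -- if not (set(line) <= set(string.hexdigits)): return 'INVALID'
  if (PySem.Set.ofList line.toList).all (fun c => hexdigitsSet.contains c) then
    -- n = int(line[2:], 16)
    match PySem.Int.ofStrBase? (PySem.Str.slice line (some 2) none) 16 with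
    | none => ""      -- int('', 16) raises ValueError: excluded by Pre_process
    | some n =>
      -- 'VALID' if format(s, 'x') == line[:2].lower() else 'INVALID';  s ≥ 0, so format(s, 'x') is Nat.toDigits 16 s
      if Nat.toDigits 16 (digitSumChunks n).toNat == PySem.Chars.lower (PySem.List.slice line.toList none (some 2))
      then "VALID" else "INVALID"
  else "INVALID"

-- ===== PRECONDITION & SPEC =====

-- Pre_ excludes exactly the inputs on which A raises ValueError (int('', 16)): lines of length ≤ 2
-- all of whose characters are hex digits. B raises there too.
def Pre_process (line : String) : Prop :=
  ¬ (line.toList.all (fun c => hexAll.contains c) = true ∧ line.toList.length ≤ 2)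
instance (line : String) : Decidable (Pre_process line) := by unfold Pre_process; infer_instance

def pvWitness_process : String := "1f2"

def Spec_process (line : String) (out : String) : Prop := out = process_alt line
instance (line : String) (out : String) : Decidable (Spec_process line out) := by unfold Spec_process; infer_instance

-- ===== CLAIM (what is proved, stated in full; the proofs are below) =====
def Claim_equal_process : Prop := ∀ (line : String), Dom_process line → Pre_process line → Spec_process line (process line)

-- ===== LEMMAS AND PROOFS =====

-- the two hex-validity guards agree
lemma guard_eq (cs : List Char) :
    ((PySem.Set.ofList cs).all (fun c => hexdigitsSet.contains c)) = cs.all (fun c => hexAll.contains c) := by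
  rw [Bool.eq_iff_iff]
  simp [List.all_eq_true, hexdigitsSet, hexAll, PySem.Set.mem_ofList]

-- recursive characterisation of Nat.toDigits (any base ≥ 2)
def digRec (b n : Nat) : List Char :=
  if h : n / b = 0 ∨ b < 2 then [Nat.digitChar (n % b)]
  else digRec b (n / b) ++ [Nat.digitChar (n % b)]
termination_by n
decreasing_by
  exact Nat.div_lt_self (Nat.pos_of_ne_zero (fun h0 => (not_or.1 h).1 (by simp [h0]))) (by omega)

lemma toDigitsCore_eq (b : Nat) (hb : 2 ≤ b) :
    ∀ (f n : Nat) (acc : List Char), n < b ^ (f + 1) →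
      Nat.toDigitsCore b (f + 1) n acc = digRec b n ++ acc := by
  intro f
  induction f with
  | zero =>
    intro n acc hn
    have hdiv : n / b = 0 := Nat.div_eq_of_lt (by simpa using hn)
    simp [Nat.toDigitsCore, hdiv, digRec]
  | succ f ih =>
    intro n acc hn
    by_cases hdiv : n / b = 0
    · simp [Nat.toDigitsCore, hdiv, digRec]
    · rw [Nat.toDigitsCore]
      simp only [hdiv, if_false]
      rw [ih (n / b) _ (Nat.div_lt_of_lt_mul (by rw [pow_succ, mul_comm] at hn; exact hn))]
      conv_rhs => rw [digRec]
      rw [dif_neg (by omega)]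
      simp [List.append_assoc]

lemma toDigits_eq (b n : Nat) (hb : 2 ≤ b) : Nat.toDigits b n = digRec b n := by
  have := toDigitsCore_eq b hb n n []
  rw [Nat.toDigits]
  rw [this (lt_of_lt_of_le Nat.lt_two_pow_self
    (le_trans (Nat.pow_le_pow_left hb n) (Nat.pow_le_pow_right (by omega) (by omega))))]
  simp

lemma digitSumLoop_natCast_eq (m : Nat) :
    digitSumLoop (m : Int) = if m = 0 then 0 else ((m % 10 : Nat) : Int) + digitSumLoop ((m / 10 : Nat) : Int) := by
  rw [digitSumLoop]
  by_cases hm : m = 0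
  · simp [hm]
  · rw [dif_pos (by exact_mod_cast Nat.pos_of_ne_zero hm)]
    have h1 : PySem.Int.mod (m : Int) 10 = ((m % 10 : Nat) : Int) := by
      exact_mod_cast PySem.Int.mod_natCast m 10
    have h2 : PySem.Int.floordiv (m : Int) 10 = ((m / 10 : Nat) : Int) := by
      exact_mod_cast PySem.Int.floordiv_natCast m 10
    rw [if_neg hm, h1, h2]

lemma digitSumLoop_nonneg (n : Int) : 0 ≤ digitSumLoop n := by
  fun_induction digitSumLoop n with
  | case1 n h ih =>
    have := PySem.Int.mod_nonneg n (b := 10) (by omega)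
    omega
  | case2 n h => omega

lemma digitSumLoop_zero : digitSumLoop 0 = 0 := by
  rw [digitSumLoop]; simp

lemma digitSumLoop_mul_pow_add (k : Nat) : ∀ (q r : Nat), r < 10 ^ k →
    digitSumLoop ((q * 10 ^ k + r : Nat) : Int) = digitSumLoop (q : Int) + digitSumLoop (r : Int) := by
  induction k with
  | zero =>
    intro q r hr
    interval_cases r
    simp [digitSumLoop_zero]
  | succ k ih =>
    intro q r hr
    by_cases hm : q * 10 ^ (k + 1) + r = 0
    · have h1 : q * 10 ^ (k + 1) = 0 ∧ r = 0 := Nat.add_eq_zero_iff.1 hm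
      have hq : q = 0 := by
        rcases Nat.mul_eq_zero.1 h1.1 with h2 | h2
        · exact h2
        · exact absurd h2 (by positivity)
      simp [hq, h1.2, digitSumLoop_zero]
    · have he : q * 10 ^ (k + 1) = 10 * (q * 10 ^ k) := by ring
      have hmod : (q * 10 ^ (k + 1) + r) % 10 = r % 10 := by
        rw [he, Nat.mul_add_mod]
      have hdiv : (q * 10 ^ (k + 1) + r) / 10 = q * 10 ^ k + r / 10 := by
        rw [he, Nat.mul_add_div (by omega)]
      have hrk : r / 10 < 10 ^ k := Nat.div_lt_of_lt_mul (by calc r < 10 ^ (k+1) := hr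
          _ = 10 * 10 ^ k := by ring)
      rw [digitSumLoop_natCast_eq, if_neg hm, hmod, hdiv, ih q (r / 10) hrk]
      by_cases hr0 : r = 0
      · simp [hr0, digitSumLoop_zero]
      · rw [digitSumLoop_natCast_eq r, if_neg hr0]
        ring

lemma digitSumChunks_eq (n : Int) : digitSumChunks n = digitSumLoop n := by
  fun_induction digitSumChunks n with
  | case1 n h ih =>
    have hK : (0 : Int) < 10 ^ 36 := by positivity
    have hq : PySem.Int.floordiv n (10 ^ 36) = n / 10 ^ 36 := PySem.Int.floordiv_eq_ediv_of_pos hK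
    have hr : PySem.Int.mod n (10 ^ 36) = n % 10 ^ 36 := PySem.Int.mod_eq_emod_of_pos hK
    have hq0 : 0 ≤ n / 10 ^ 36 := Int.ediv_nonneg (le_of_lt h) (le_of_lt hK)
    have hr0 : 0 ≤ n % 10 ^ 36 := Int.emod_nonneg n (by positivity)
    have hrlt : n % 10 ^ 36 < 10 ^ 36 := Int.emod_lt_of_pos n hK
    have hsplit : n = (n / 10 ^ 36) * 10 ^ 36 + n % 10 ^ 36 := by
      rw [mul_comm]
      exact (Int.ediv_add_emod n (10 ^ 36)).symm
    have hnat : n.toNat = (n / 10 ^ 36).toNat * 10 ^ 36 + (n % 10 ^ 36).toNat := by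
      omega
    have hrnat : (n % 10 ^ 36).toNat < 10 ^ 36 := by omega
    have hmain := digitSumLoop_mul_pow_add 36 (n / 10 ^ 36).toNat (n % 10 ^ 36).toNat
      (by exact_mod_cast hrnat)
    rw [← hnat] at hmain
    rw [Int.toNat_of_nonneg (le_of_lt h), Int.toNat_of_nonneg hq0, Int.toNat_of_nonneg hr0] at hmain
    rw [ih, hq, hr, hmain]
    ring
  | case2 n h =>
    rw [digitSumLoop, dif_neg h]

lemma digitChar_toNat (d : Nat) (hd : d < 16) :
    (Nat.digitChar d).toNat = if d < 10 then d + 48 else d + 87 := by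
  interval_cases d <;> decide

-- A's digit sum over str(temp) equals B's arithmetic loop
lemma sum_digRec (m : Nat) :
    ((digRec 10 m).map (fun c => ((c.toNat : Int) - 48))).sum = digitSumLoop (m : Int) := by
  fun_induction digRec 10 m with
  | case1 n h =>
    have hn : n < 10 := by
      rcases h with h | h
      · omega
      · exact absurd h (by omega)
    have hdc : (Nat.digitChar (n % 10)).toNat = n % 10 + 48 := by
      rw [digitChar_toNat _ (by omega), if_pos (by omega)]
    simp only [List.map_cons, List.map_nil, List.sum_cons, List.sum_nil, hdc]
    rw [digitSumLoop_natCast_eq]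
    by_cases h0 : n = 0
    · simp [h0]
    · rw [if_neg h0, digitSumLoop_natCast_eq, if_pos (by omega)]
      push_cast
      omega
  | case2 n h ih =>
    have hdiv : ¬ n / 10 = 0 := by
      rcases not_or.1 h with ⟨h1, _⟩; exact h1
    have hdc : (Nat.digitChar (n % 10)).toNat = n % 10 + 48 := by
      rw [digitChar_toNat _ (by omega), if_pos (by omega)]
    simp only [List.map_append, List.sum_append, ih, List.map_cons, List.map_nil,
      List.sum_cons, List.sum_nil, hdc]
    rw [digitSumLoop_natCast_eq (m := n), if_neg (by omega)]
    push_cast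
    omega

lemma sum_toChars (t : Int) (ht : 0 ≤ t) :
    ((PySem.Int.toChars t).map (fun c => ((c.toNat : Int) - 48))).sum = digitSumLoop t := by
  rw [PySem.Int.toChars, if_neg (by omega), toDigits_eq 10 _ (by omega), sum_digRec,
    Int.toNat_of_nonneg ht]

-- the hex digits of a number never contain 'x'
lemma digRec16_mem (n : Nat) : ∀ c ∈ digRec 16 n, c ∈ ("0123456789abcdef".toList) := by
  fun_induction digRec 16 n with
  | case1 n h =>
    intro c hc
    have hall : ∀ d < 16, Nat.digitChar d ∈ ("0123456789abcdef".toList) := by decide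
    simp only [List.mem_singleton] at hc
    subst hc
    exact hall _ (Nat.mod_lt _ (by omega))
  | case2 n h ih =>
    intro c hc
    rcases List.mem_append.1 hc with hc | hc
    · exact ih c hc
    · have hall : ∀ d < 16, Nat.digitChar d ∈ ("0123456789abcdef".toList) := by decide
      simp only [List.mem_singleton] at hc
      subst hc
      exact hall _ (Nat.mod_lt _ (by omega))

lemma splitOn_go_no_sep (fuel : Nat) : ∀ (l cur : List Char) (acc : List (List Char)), 'x' ∉ l →
    PySem.Chars.splitOn.go ['x'] fuel l cur acc = ((cur.reverse ++ l) :: acc).reverse := by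
  induction fuel with
  | zero => intro l cur acc h; rfl
  | succ fuel ih =>
    intro l cur acc h
    cases l with
    | nil => simp [PySem.Chars.splitOn.go]
    | cons c rest =>
      rw [PySem.Chars.splitOn.go]
      have hc : c ≠ 'x' := fun hc => h (by simp [hc])
      rw [if_neg (by simp [List.isPrefixOf]; intro hh; exact absurd hh.symm hc)]
      rw [ih rest (c :: cur) acc (fun hr => h (List.mem_cons_of_mem _ hr))]
      simp

lemma split_0x (D : List Char) (h : 'x' ∉ D) :
    PySem.Chars.splitOn ('0' :: 'x' :: D) ['x'] = [['0'], D] := by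
  rw [PySem.Chars.splitOn]
  have hlen : ('0' :: 'x' :: D).length + 1 = (D.length + 2) + 1 := by simp
  rw [hlen]
  rw [PySem.Chars.splitOn.go]
  rw [if_neg (by simp [List.isPrefixOf])]
  have h2 : D.length + 2 = (D.length + 1) + 1 := rfl
  rw [h2, PySem.Chars.splitOn.go]
  rw [if_pos (by simp [List.isPrefixOf])]
  simp only [List.length_cons, List.length_nil, List.drop_succ_cons, List.drop_zero,
    List.reverse_cons, List.reverse_nil, List.nil_append]
  rw [splitOn_go_no_sep _ _ _ _ h]
  simp

-- hex(s).split('x')[-1] is just the hex digits, for s ≥ 0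
lemma hex_split (s : Int) (hs : 0 ≤ s) :
    PySem.List.pyGetD (PySem.Chars.splitOn (pyHexChars s) ['x']) (-1) [] = Nat.toDigits 16 s.toNat := by
  have hx : 'x' ∉ Nat.toDigits 16 s.toNat := by
    rw [toDigits_eq 16 _ (by omega)]
    intro hmem
    exact absurd (digRec16_mem s.toNat _ hmem) (by decide)
  rw [pyHexChars, if_neg (by omega), split_0x _ hx]
  exact PySem.List.pyGetD_neg_one_append_singleton (xs := [['0']]) (x := Nat.toDigits 16 s.toNat) (d := [])

-- int(cs, 16) is nonnegative when cs has no '-'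
lemma ofCharsBase?_nonneg (cs : List Char) (t : Int) (hm : '-' ∉ cs)
    (h : PySem.Int.ofCharsBase? cs 16 = some t) : 0 ≤ t := by
  have hsub : ∀ c, c ∈ (List.dropWhile PySem.Int.isIntSpace
      (List.dropWhile PySem.Int.isIntSpace cs).reverse).reverse → c ∈ cs := by
    intro c hc
    rw [List.mem_reverse] at hc
    have h1 := List.dropWhile_sublist (p := PySem.Int.isIntSpace)
      (l := (List.dropWhile PySem.Int.isIntSpace cs).reverse)
    have h2 := List.dropWhile_sublist (p := PySem.Int.isIntSpace) (l := cs)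
    have := h1.mem hc
    rw [List.mem_reverse] at this
    exact h2.mem this
  rw [PySem.Int.ofCharsBase?] at h
  rw [if_neg (by decide)] at h
  simp only [] at h
  repeat split at h
  all_goals try (exfalso; revert h; simp; done)
  all_goals injection h with h'
  all_goals subst h'
  split
  · next r heq => exact absurd (hsub '-' (by rw [heq]; simp)) hm
  · simp
  · simp

-- ===== VERDICT (by name: the statement is the Claim_ definition above) =====
theorem process_spec : Claim_equal_process := by
  intro line _ _
  unfold Spec_process process process_alt
  rw [guard_eq]
  by_cases hg : line.toList.all (fun c => hexAll.contains c) = true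
  · rw [if_pos hg, if_pos hg]
    cases hp : PySem.Int.ofStrBase? (PySem.Str.slice line (some 2) none) 16 with
    | none => simp only [hp]
    | some t =>
      simp only [hp]
      have hnm : '-' ∉ (PySem.Str.slice line (some 2) none).toList := by
        intro hmem
        rw [PySem.Str.toList_slice, PySem.Chars.slice_eq_listSlice] at hmem
        have h1 : ('-' : Char) ∈ line.toList := PySem.List.mem_of_mem_slice _ _ _ hmem
        have h2 := (List.all_eq_true.1 hg) _ h1
        exact absurd h2 (by decide)
      have ht : 0 ≤ t := by
        rw [PySem.Int.ofStrBase?] at hp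
        exact ofCharsBase?_nonneg _ _ hnm hp
      rw [sum_toChars t ht, digitSumChunks_eq, hex_split _ (digitSumLoop_nonneg t)]
      by_cases he : Nat.toDigits 16 (digitSumLoop t).toNat
          = PySem.Chars.lower (PySem.List.slice line.toList none (some 2))
      · simp [he]
      · simp [he]
  · rw [if_neg hg, if_neg hg]
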